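-- pv_equiv track=rewrite | github.com/noorrani-the-coder/Presopod | backend/routes/presentation.py | _build_summary_points
-- ===== SOURCE A (Python) =====
-- def _build_summary_points(slides, max_points=10):
--     raw_points = []
--     for slide in slides or []:
--         for bullet in (slide.get("bullets") or []):
--             if not isinstance(bullet, str):
--                 continue
--             text = " ".join(bullet.strip().split())
--             if text:
--                 raw_points.append(text)
--
--     points = []
--     seen = set()
--     for point in raw_points:
--         key = point.lower()
--         if key in seen:
--             continue
--         seen.add(key)
--         points.append(point)
--         if len(points) >= max_points:
--             break
--     return points
-- ===== SOURCE B (Python) =====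
-- def _build_summary_points(slides, max_points=10):
--     points = []
--     seen = set()
--     for slide in slides or []:
--         for bullet in slide.get("bullets") or []:
--             if not isinstance(bullet, str):
--                 continue
--             text = " ".join(bullet.strip().split())
--             if not text:
--                 continue
--             key = text.lower()
--             if key in seen:
--                 continue
--             seen.add(key)
--             points.append(text)
--             if len(points) >= max_points:
--                 return points
--     return points
-- ===== Notes on version B (the rewrite author's own statement) =====
-- stated objective: simpler
-- what changed: Fuses collection, normalization, dedup and the cap into one traversal with an early return, eliminating the intermediate raw_points list and the whole second pass.
import Mathlib
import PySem

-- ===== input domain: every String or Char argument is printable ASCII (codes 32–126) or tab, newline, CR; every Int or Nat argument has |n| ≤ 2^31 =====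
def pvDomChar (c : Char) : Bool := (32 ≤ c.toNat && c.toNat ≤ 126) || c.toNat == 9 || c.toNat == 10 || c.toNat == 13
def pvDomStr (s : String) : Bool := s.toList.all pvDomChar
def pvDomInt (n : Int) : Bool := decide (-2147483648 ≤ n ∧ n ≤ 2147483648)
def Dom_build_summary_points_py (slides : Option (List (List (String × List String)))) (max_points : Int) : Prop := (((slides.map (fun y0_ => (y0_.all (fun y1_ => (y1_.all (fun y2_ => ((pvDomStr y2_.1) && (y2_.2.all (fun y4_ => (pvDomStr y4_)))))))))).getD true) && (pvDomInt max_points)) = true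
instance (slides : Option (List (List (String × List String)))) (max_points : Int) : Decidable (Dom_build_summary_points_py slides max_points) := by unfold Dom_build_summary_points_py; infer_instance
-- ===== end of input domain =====

-- B fuses A's two phases (collect-normalize, then dedup-with-cap) into one traversal with an
-- early return, removing the intermediate raw_points list; same result, same asymptotic cost.


-- ===== PORT A =====
-- text = " ".join(bullet.strip().split())  (shared normalization; the bullets are typed str,
-- so the isinstance(bullet, str) guard is always true and has no Lean counterpart)
def pvNorm (b : String) : String :=
  PySem.Str.join " " (PySem.Str.split₀ (PySem.Str.strip b))

-- A's second loop: dedup by lowercased key, break once len(points) >= max_points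
def pvDedupA : List String → PySem.Set String → List String → Int → List String
  | [], _, points, _ => points
  | p :: rest, seen, points, mp =>
    let key := PySem.Str.lower p
    if PySem.Set.contains seen key then pvDedupA rest seen points mp
    else
      let seen' := PySem.Set.add seen key
      let points' := points ++ [p]
      if mp ≤ (points'.length : Int) then points'
      else pvDedupA rest seen' points' mp

def build_summary_points_py (slides : Option (List (List (String × List String)))) (max_points : Int) : List String :=
  let raw_points := (slides.getD []).foldl (fun raw slide =>
    ((List.lookup "bullets" slide).getD []).foldl (fun raw bullet =>
      let text := pvNorm bullet
      if text = "" then raw else raw ++ [text]) raw) []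
  pvDedupA raw_points PySem.Set.empty [] max_points

-- ===== PORT B =====
-- B's inner loop over one slide's bullets; the Bool flags the early `return points`
def pvBullB : List String → PySem.Set String → List String → Int → PySem.Set String × List String × Bool
  | [], seen, points, _ => (seen, points, false)
  | b :: rest, seen, points, mp =>
    let text := pvNorm b
    if text = "" then pvBullB rest seen points mp
    else
      let key := PySem.Str.lower text
      if PySem.Set.contains seen key then pvBullB rest seen points mp
      else
        let seen' := PySem.Set.add seen key
        let points' := points ++ [text]
        if mp ≤ (points'.length : Int) then (seen', points', true)
        else pvBullB rest seen' points' mp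

def pvSlidesB : List (List (String × List String)) → PySem.Set String → List String → Int → List String
  | [], _, points, _ => points
  | s :: rest, seen, points, mp =>
    match pvBullB ((List.lookup "bullets" s).getD []) seen points mp with
    | (_, points', true) => points'
    | (seen', points', false) => pvSlidesB rest seen' points' mp

def build_summary_points_py_alt (slides : Option (List (List (String × List String)))) (max_points : Int) : List String :=
  pvSlidesB (slides.getD []) PySem.Set.empty [] max_points

-- ===== PRECONDITION & SPEC =====
def Spec_build_summary_points_py (slides : Option (List (List (String × List String)))) (max_points : Int) (out : List String) : Prop := out = build_summary_points_py_alt slides max_points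
instance (slides : Option (List (List (String × List String)))) (max_points : Int) (out : List String) : Decidable (Spec_build_summary_points_py slides max_points out) := by unfold Spec_build_summary_points_py; infer_instance

-- ===== CLAIM (what is proved, stated in full; the proofs are below) =====
def Claim_equal_build_summary_points_py : Prop := ∀ (slides : Option (List (List (String × List String)))) (max_points : Int), Dom_build_summary_points_py slides max_points → Spec_build_summary_points_py slides max_points (build_summary_points_py slides max_points)

-- ===== LEMMAS AND PROOFS =====

-- proof-side: A's dedup loop carrying its full state plus a "broke out" flag
def pvRun : List String → PySem.Set String → List String → Int → PySem.Set String × List String × Bool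
  | [], seen, points, _ => (seen, points, false)
  | p :: rest, seen, points, mp =>
    let key := PySem.Str.lower p
    if PySem.Set.contains seen key then pvRun rest seen points mp
    else
      let seen' := PySem.Set.add seen key
      let points' := points ++ [p]
      if mp ≤ (points'.length : Int) then (seen', points', true)
      else pvRun rest seen' points' mp

-- the normalized nonempty texts of one bullet list / one slide
def pvRawOf (bullets : List String) : List String :=
  bullets.filterMap (fun b => let t := pvNorm b; if t = "" then none else some t)

def pvRawSlide (s : List (String × List String)) : List String :=
  pvRawOf ((List.lookup "bullets" s).getD [])

theorem pvDedupA_eq_run (l : List String) (seen : PySem.Set String)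
    (points : List String) (mp : Int) :
    pvDedupA l seen points mp = (pvRun l seen points mp).2.1 := by
  induction l generalizing seen points with
  | nil => rfl
  | cons p rest ih =>
    simp only [pvDedupA, pvRun]
    split_ifs <;> simp [ih]

theorem pvRun_append (xs ys : List String) (seen : PySem.Set String)
    (points : List String) (mp : Int) :
    pvRun (xs ++ ys) seen points mp =
      (match pvRun xs seen points mp with
       | (s', p', true) => (s', p', true)
       | (s', p', false) => pvRun ys s' p' mp) := by
  induction xs generalizing seen points with
  | nil => rfl
  | cons p rest ih =>
    simp only [List.cons_append, pvRun]
    split_ifs <;> simp [ih]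

theorem pvBullB_eq_run (bullets : List String) (seen : PySem.Set String)
    (points : List String) (mp : Int) :
    pvBullB bullets seen points mp = pvRun (pvRawOf bullets) seen points mp := by
  induction bullets generalizing seen points with
  | nil => rfl
  | cons b rest ih =>
    simp only [pvBullB, pvRawOf, List.filterMap_cons]
    by_cases ht : pvNorm b = ""
    · simp only [ht, reduceIte]
      exact ih seen points
    · simp only [ht, reduceIte, pvRun]
      split_ifs <;> simp [ih, pvRawOf]

theorem pvSlidesB_eq_run (slides : List (List (String × List String)))
    (seen : PySem.Set String) (points : List String) (mp : Int) :
    pvSlidesB slides seen points mp = (pvRun (slides.flatMap pvRawSlide) seen points mp).2.1 := by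
  induction slides generalizing seen points with
  | nil => rfl
  | cons s rest ih =>
    simp only [pvSlidesB, List.flatMap_cons, pvBullB_eq_run, pvRun_append, pvRawSlide]
    rcases h : pvRun (pvRawOf ((List.lookup "bullets" s).getD [])) seen points mp with ⟨s', p', d⟩
    cases d <;> simp [ih]

theorem pvRaw_eq_flatMap (slides : List (List (String × List String))) (init : List String) :
    slides.foldl (fun raw slide =>
      ((List.lookup "bullets" slide).getD []).foldl (fun raw bullet =>
        let text := pvNorm bullet
        if text = "" then raw else raw ++ [text]) raw) init
    = init ++ slides.flatMap pvRawSlide := by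
  induction slides generalizing init with
  | nil => simp
  | cons s rest ih =>
    simp only [List.foldl_cons, List.flatMap_cons, ih]
    have inner : ∀ (bs : List String) (acc : List String),
        bs.foldl (fun raw bullet =>
          let text := pvNorm bullet
          if text = "" then raw else raw ++ [text]) acc = acc ++ pvRawOf bs := by
      intro bs
      induction bs with
      | nil => simp [pvRawOf]
      | cons b bt ihb =>
        intro acc
        simp only [List.foldl_cons, pvRawOf, List.filterMap_cons]
        by_cases ht : pvNorm b = "" <;> simp [ht, ihb, pvRawOf]
    rw [inner, pvRawSlide, List.append_assoc]

-- ===== VERDICT (by name: the statement is the Claim_ definition above) =====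
theorem build_summary_points_py_spec : Claim_equal_build_summary_points_py := by
  intro slides mp _
  show build_summary_points_py slides mp = build_summary_points_py_alt slides mp
  simp only [build_summary_points_py, build_summary_points_py_alt,
    pvRaw_eq_flatMap, List.nil_append, pvDedupA_eq_run, pvSlidesB_eq_run]
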